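-- pv_equiv track=rewrite | github.com/tajaa/matcha-recruit | server/app/matcha/routes/provisioning.py | _normalize_slack_channels
-- ===== SOURCE A (Python) =====
-- def _split_comma_list(value) -> list[str]:
--     if value is None:
--         return []
--     if isinstance(value, str):
--         raw_items = value.replace("\n", ",").split(",")
--     elif isinstance(value, (list, tuple, set)):
--         raw_items = list(value)
--     else:
--         raw_items = [value]
--
--     result: list[str] = []
--     seen: set[str] = set()
--     for item in raw_items:
--         normalized = str(item).strip()
--         if not normalized:
--             continue
--         lowered = normalized.lower()
--         if lowered in seen:
--             continue
--         seen.add(lowered)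
--         result.append(normalized)
--     return result
--
-- def _normalize_slack_channels(value) -> list[str]:
--     channels = _split_comma_list(value)
--     normalized: list[str] = []
--     for channel in channels:
--         cleaned = channel.strip()
--         if not cleaned:
--             continue
--         if not cleaned.startswith("#"):
--             cleaned = f"#{cleaned}"
--         normalized.append(cleaned.lower())
--     # De-dupe preserving order
--     deduped: list[str] = []
--     seen: set[str] = set()
--     for channel in normalized:
--         if channel in seen:
--             continue
--         seen.add(channel)
--         deduped.append(channel)
--     return deduped
-- ===== SOURCE B (Python) =====
-- def _normalize_slack_channels(value) -> list[str]:
--     # One pass, one dedup set keyed on the final lowercased "#"-prefixed name.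
--     if value is None:
--         raw_items = []
--     elif isinstance(value, str):
--         raw_items = value.replace("\n", ",").split(",")
--     elif isinstance(value, (list, tuple, set)):
--         raw_items = list(value)
--     else:
--         raw_items = [value]
--
--     result: list[str] = []
--     seen: set[str] = set()
--     for item in raw_items:
--         cleaned = str(item).strip()
--         if not cleaned:
--             continue
--         if not cleaned.startswith("#"):
--             cleaned = f"#{cleaned}"
--         final = cleaned.lower()
--         if final not in seen:
--             seen.add(final)
--             result.append(final)
--     return result
-- ===== Notes on version B (the rewrite author's own statement) =====
-- stated objective: simpler
-- what changed: Collapses A's helper plus three sequential passes (case-insensitive dedup on bare names, hash-prefix-and-lowercase map, second dedup on final names) into one loop with a single seen-set keyed on the final lowercased hash-prefixed name; equivalence rests on lowercasing commuting with hash-prefixing.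
import Mathlib
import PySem

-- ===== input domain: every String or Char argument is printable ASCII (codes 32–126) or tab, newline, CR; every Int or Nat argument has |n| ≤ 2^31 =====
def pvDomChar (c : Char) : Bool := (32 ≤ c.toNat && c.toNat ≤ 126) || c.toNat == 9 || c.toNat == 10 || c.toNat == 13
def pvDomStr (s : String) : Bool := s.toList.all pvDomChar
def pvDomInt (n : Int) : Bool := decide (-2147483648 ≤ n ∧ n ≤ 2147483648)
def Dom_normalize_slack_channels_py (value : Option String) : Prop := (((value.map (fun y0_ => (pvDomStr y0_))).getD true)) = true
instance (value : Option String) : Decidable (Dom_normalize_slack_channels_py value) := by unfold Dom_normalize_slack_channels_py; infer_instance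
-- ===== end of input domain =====

-- B collapses A's helper plus three sequential passes into one loop with a single seen-set
-- keyed on the final lowercased '#'-prefixed name (objective: simpler).
-- String work is done on List Char via PySem.Chars (exact on the stated domain).

-- ===== PORT A =====
-- _split_comma_list, restricted to the Option String signature (None / str branches).
def pvSplitCommaList (value : Option String) : List (List Char) :=
  match value with
  | none => []
  | some s =>
    let rawItems := PySem.Chars.splitOn (PySem.Chars.replace s.toList ['\n'] [',']) [',']
    (rawItems.foldl (fun (st : List (List Char) × PySem.Set (List Char)) item =>
        let normalized := PySem.Chars.strip item
        if normalized = [] then st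
        else
          let lowered := PySem.Chars.lower normalized
          if PySem.Set.contains st.2 lowered then st
          else (st.1 ++ [normalized], PySem.Set.add st.2 lowered))
      ([], PySem.Set.empty)).1

def normalize_slack_channels_py (value : Option String) : List String :=
  let channels := pvSplitCommaList value
  let normalized := channels.foldl (fun acc channel =>
      let cleaned := PySem.Chars.strip channel
      if cleaned = [] then acc
      else
        let cleaned := if !(PySem.Chars.startswith cleaned ['#']) then '#' :: cleaned else cleaned
        acc ++ [PySem.Chars.lower cleaned]) []
  ((normalized.foldl (fun (st : List (List Char) × PySem.Set (List Char)) channel =>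
      if PySem.Set.contains st.2 channel then st
      else (st.1 ++ [channel], PySem.Set.add st.2 channel)) ([], PySem.Set.empty)).1).map String.mk

-- ===== PORT B =====
def normalize_slack_channels_py_alt (value : Option String) : List String :=
  let rawItems : List (List Char) :=
    match value with
    | none => []
    | some s => PySem.Chars.splitOn (PySem.Chars.replace s.toList ['\n'] [',']) [',']
  ((rawItems.foldl (fun (st : List (List Char) × PySem.Set (List Char)) item =>
      let cleaned := PySem.Chars.strip item
      if cleaned = [] then st
      else
        let final := PySem.Chars.lower (if !(PySem.Chars.startswith cleaned ['#']) then '#' :: cleaned else cleaned)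
        if PySem.Set.contains st.2 final then st
        else (st.1 ++ [final], PySem.Set.add st.2 final)) ([], PySem.Set.empty)).1).map String.mk

-- ===== PRECONDITION & SPEC =====
def Spec_normalize_slack_channels_py (value : Option String) (out : List String) : Prop := out = normalize_slack_channels_py_alt value
instance (value : Option String) (out : List String) : Decidable (Spec_normalize_slack_channels_py value out) := by unfold Spec_normalize_slack_channels_py; infer_instance

-- ===== CLAIM (what is proved, stated in full; the proofs are below) =====
def Claim_equal_normalize_slack_channels_py : Prop := ∀ (value : Option String), Dom_normalize_slack_channels_py value → Spec_normalize_slack_channels_py value (normalize_slack_channels_py value)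

-- ===== LEMMAS AND PROOFS =====

-- '#'-prefixing as A's stage 2 performs it
def pvAddHash (c : List Char) : List Char :=
  if !(PySem.Chars.startswith c ['#']) then '#' :: c else c

-- the final form of a cleaned (stripped, nonempty) item
def pvFin (c : List Char) : List Char := PySem.Chars.lower (pvAddHash c)

-- recursive forms of the four loops (seen sets threaded exactly as in the folds)
def pvD1 : List (List Char) → PySem.Set (List Char) → List (List Char)
  | [], _ => []
  | x :: xs, seen =>
    let n := PySem.Chars.strip x
    if n = [] then pvD1 xs seen
    else if PySem.Set.contains seen (PySem.Chars.lower n) then pvD1 xs seen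
    else n :: pvD1 xs (PySem.Set.add seen (PySem.Chars.lower n))

def pvM2 : List (List Char) → List (List Char)
  | [] => []
  | ch :: chs =>
    let c := PySem.Chars.strip ch
    if c = [] then pvM2 chs else pvFin c :: pvM2 chs

def pvD2 : List (List Char) → PySem.Set (List Char) → List (List Char)
  | [], _ => []
  | z :: zs, seen =>
    if PySem.Set.contains seen z then pvD2 zs seen
    else z :: pvD2 zs (PySem.Set.add seen z)

def pvDB : List (List Char) → PySem.Set (List Char) → List (List Char)
  | [], _ => []
  | x :: xs, seen =>
    let c := PySem.Chars.strip x
    if c = [] then pvDB xs seen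
    else if PySem.Set.contains seen (pvFin c) then pvDB xs seen
    else pvFin c :: pvDB xs (PySem.Set.add seen (pvFin c))

-- fold ↔ recursion characterisations
theorem pvFold1_eq (xs : List (List Char)) (acc : List (List Char)) (seen : PySem.Set (List Char)) :
    (xs.foldl (fun (st : List (List Char) × PySem.Set (List Char)) item =>
        let normalized := PySem.Chars.strip item
        if normalized = [] then st
        else
          let lowered := PySem.Chars.lower normalized
          if PySem.Set.contains st.2 lowered then st
          else (st.1 ++ [normalized], PySem.Set.add st.2 lowered)) (acc, seen)).1
      = acc ++ pvD1 xs seen := by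
  induction xs generalizing acc seen with
  | nil => simp [pvD1]
  | cons x xs ih =>
    simp only [List.foldl_cons, pvD1]
    split_ifs with h1 h2
    · simpa using ih acc seen
    · simpa using ih acc seen
    · simpa using ih (acc ++ [PySem.Chars.strip x]) (seen.add (PySem.Chars.lower (PySem.Chars.strip x)))

theorem pvFold2_eq (chs : List (List Char)) (acc : List (List Char)) :
    (chs.foldl (fun acc channel =>
        let cleaned := PySem.Chars.strip channel
        if cleaned = [] then acc
        else
          let cleaned := if !(PySem.Chars.startswith cleaned ['#']) then '#' :: cleaned else cleaned
          acc ++ [PySem.Chars.lower cleaned]) acc)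
      = acc ++ pvM2 chs := by
  induction chs generalizing acc with
  | nil => simp [pvM2]
  | cons ch chs ih =>
    simp only [List.foldl_cons, pvM2]
    split_ifs with h1 h2
    · simpa using ih acc
    · simpa [pvFin, pvAddHash, h2] using ih (acc ++ [PySem.Chars.lower ('#' :: PySem.Chars.strip ch)])
    · simpa [pvFin, pvAddHash, h2] using ih (acc ++ [PySem.Chars.lower (PySem.Chars.strip ch)])

theorem pvFold3_eq (zs : List (List Char)) (acc : List (List Char)) (seen : PySem.Set (List Char)) :
    (zs.foldl (fun (st : List (List Char) × PySem.Set (List Char)) channel =>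
        if PySem.Set.contains st.2 channel then st
        else (st.1 ++ [channel], PySem.Set.add st.2 channel)) (acc, seen)).1
      = acc ++ pvD2 zs seen := by
  induction zs generalizing acc seen with
  | nil => simp [pvD2]
  | cons z zs ih =>
    simp only [List.foldl_cons, pvD2]
    split_ifs with h1
    · simpa using ih acc seen
    · simpa using ih (acc ++ [z]) (seen.add z)

theorem pvFoldB_eq (xs : List (List Char)) (acc : List (List Char)) (seen : PySem.Set (List Char)) :
    (xs.foldl (fun (st : List (List Char) × PySem.Set (List Char)) item =>
        let cleaned := PySem.Chars.strip item
        if cleaned = [] then st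
        else
          let final := PySem.Chars.lower (if !(PySem.Chars.startswith cleaned ['#']) then '#' :: cleaned else cleaned)
          if PySem.Set.contains st.2 final then st
          else (st.1 ++ [final], PySem.Set.add st.2 final)) (acc, seen)).1
      = acc ++ pvDB xs seen := by
  induction xs generalizing acc seen with
  | nil => simp [pvDB]
  | cons x xs ih =>
    simp only [List.foldl_cons, pvDB, pvFin, pvAddHash]
    split_ifs with h1 h2 h3 h4
    · simpa using ih acc seen
    · simpa using ih acc seen
    · simpa using ih (acc ++ [PySem.Chars.lower ('#' :: PySem.Chars.strip x)])
        (seen.add (PySem.Chars.lower ('#' :: PySem.Chars.strip x)))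
    · simpa using ih acc seen
    · simpa using ih (acc ++ [PySem.Chars.lower (PySem.Chars.strip x)])
        (seen.add (PySem.Chars.lower (PySem.Chars.strip x)))

-- strip is idempotent
theorem pvDropWhile_head (p : Char → Bool) (l xs : List Char) (x : Char)
    (h : l.dropWhile p = x :: xs) : p x = false := by
  induction l generalizing xs with
  | nil => simp at h
  | cons a as ih =>
    rw [List.dropWhile_cons] at h
    by_cases hp : p a = true
    · rw [if_pos hp] at h; exact ih xs h
    · rw [if_neg hp] at h
      obtain ⟨rfl, -⟩ := List.cons.inj h
      simpa using hp

theorem pvLstrip_strip (s : List Char) :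
    PySem.Chars.lstrip (PySem.Chars.strip s) = PySem.Chars.strip s := by
  simp only [PySem.Chars.strip, PySem.Chars.lstrip, PySem.Chars.rstrip]
  rcases hr : (List.dropWhile PySem.Chars.isspace
      (List.dropWhile PySem.Chars.isspace s).reverse).reverse with _ | ⟨h, t⟩
  · simp
  · obtain ⟨pre, hpre⟩ := List.dropWhile_suffix (p := PySem.Chars.isspace)
      (l := (List.dropWhile PySem.Chars.isspace s).reverse)
    have hrev := congrArg List.reverse hpre
    rw [List.reverse_append, hr, List.reverse_reverse] at hrev
    have hh : PySem.Chars.isspace h = false :=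
      pvDropWhile_head _ _ _ _ (by simpa using hrev.symm)
    rw [List.dropWhile_cons, hh]
    simp

theorem pvStrip_idem (s : List Char) :
    PySem.Chars.strip (PySem.Chars.strip s) = PySem.Chars.strip s := by
  have h1 : PySem.Chars.strip (PySem.Chars.strip s)
      = PySem.Chars.rstrip (PySem.Chars.lstrip (PySem.Chars.strip s)) := rfl
  rw [h1, pvLstrip_strip]
  simp only [PySem.Chars.strip, PySem.Chars.rstrip, List.reverse_reverse,
    List.dropWhile_idempotent]

-- lowering never creates or destroys a leading '#'
theorem pvLowerChar_hash (h : Char) : (PySem.Chars.lowerChar h = '#') ↔ h = '#' := by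
  constructor
  · intro he
    by_cases hu : PySem.Chars.isupper h = true
    · exfalso
      simp [PySem.Chars.isupper] at hu
      have h1 : 65 ≤ h.toNat := hu.1
      have h2 : h.toNat ≤ 90 := hu.2
      rw [PySem.Chars.lowerChar, if_pos (by simp [PySem.Chars.isupper]; exact hu)] at he
      have := congrArg Char.toNat he
      rw [Char.toNat_ofNat] at this
      have hv : (h.toNat + 32).isValidChar := by left; omega
      simp [hv] at this
      omega
    · rwa [PySem.Chars.lowerChar, if_neg hu] at he
  · intro he; subst he; decide

-- pvFin factors through lower: lower (addHash c) = addHash (lower c)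
theorem pvFin_eq_addHash_lower (c : List Char) :
    pvFin c = pvAddHash (PySem.Chars.lower c) := by
  rcases c with _ | ⟨h, t⟩
  · decide
  · by_cases hh : h = '#'
    · subst hh
      simp [pvFin, pvAddHash, PySem.Chars.lower, PySem.Chars.startswith, List.isPrefixOf,
        show PySem.Chars.lowerChar '#' = '#' from by decide]
    · have hl : PySem.Chars.lowerChar h ≠ '#' := fun he => hh ((pvLowerChar_hash h).mp he)
      have hh' : ¬ ('#' = h) := fun e => hh e.symm
      have hl' : ¬ ('#' = PySem.Chars.lowerChar h) := fun e => hl e.symm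
      simp [pvFin, pvAddHash, PySem.Chars.lower, PySem.Chars.startswith, List.isPrefixOf,
        hh', hl', show PySem.Chars.lowerChar '#' = '#' from by decide]

-- main lemma: A's three stages equal B's single pass, for related seen sets
theorem pvMain (xs : List (List Char)) (seen1 seen2 : PySem.Set (List Char))
    (hinv : ∀ l, l ∈ seen1 → pvAddHash l ∈ seen2) :
    pvD2 (pvM2 (pvD1 xs seen1)) seen2 = pvDB xs seen2 := by
  induction xs generalizing seen1 seen2 with
  | nil => simp [pvD1, pvM2, pvD2, pvDB]
  | cons x xs ih =>
    simp only [pvD1, pvDB]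
    by_cases h1 : PySem.Chars.strip x = []
    · simp only [h1, if_true]
      exact ih seen1 seen2 hinv
    · simp only [if_neg h1]
      set c := PySem.Chars.strip x with hc
      set l := PySem.Chars.lower c with hl
      by_cases h2 : PySem.Set.contains seen1 l = true
      · -- A's stage 1 already saw this lowered bare name; B has seen the final form
        have hmem : l ∈ seen1 := by simpa using h2
        have hfin : pvFin c ∈ seen2 := by
          rw [pvFin_eq_addHash_lower]; exact hinv l hmem
        have hfin' : PySem.Set.contains seen2 (pvFin c) = true := by simpa using hfin
        simp only [h2, if_true, hfin', if_true]
        exact ih seen1 seen2 hinv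
      · simp only [h2, if_false, Bool.false_eq_true]
        have hm2 : pvM2 (c :: pvD1 xs (PySem.Set.add seen1 l)) =
            pvFin c :: pvM2 (pvD1 xs (PySem.Set.add seen1 l)) := by
          simp only [pvM2]
          rw [← hc] at *
          rw [show PySem.Chars.strip c = c from by rw [hc]; exact pvStrip_idem x]
          simp [h1]
        rw [hm2]
        simp only [pvD2]
        by_cases h3 : PySem.Set.contains seen2 (pvFin c) = true
        · simp only [h3, if_true]
          refine ih (PySem.Set.add seen1 l) seen2 ?_
          intro l' hl'
          rcases (PySem.Set.mem_add seen1 l l').mp hl' with hin | heq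
          · exact hinv l' hin
          · subst heq
            have : pvAddHash l = pvFin c := (pvFin_eq_addHash_lower c).symm
            rw [this]
            simpa using h3
        · simp only [h3, if_false, Bool.false_eq_true]
          congr 1
          refine ih (PySem.Set.add seen1 l) (PySem.Set.add seen2 (pvFin c)) ?_
          intro l' hl'
          rcases (PySem.Set.mem_add seen1 l l').mp hl' with hin | heq
          · exact (PySem.Set.mem_add seen2 (pvFin c) (pvAddHash l')).mpr (Or.inl (hinv l' hin))
          · subst heq
            refine (PySem.Set.mem_add seen2 (pvFin c) (pvAddHash l)).mpr (Or.inr ?_)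
            exact (pvFin_eq_addHash_lower c).symm

-- ===== VERDICT (by name: the statement is the Claim_ definition above) =====
theorem normalize_slack_channels_py_spec : Claim_equal_normalize_slack_channels_py := by
  intro value _
  unfold Spec_normalize_slack_channels_py normalize_slack_channels_py normalize_slack_channels_py_alt pvSplitCommaList
  cases value with
  | none => rfl
  | some s =>
      simp only [pvFold1_eq, pvFold2_eq, pvFold3_eq, pvFoldB_eq, List.nil_append]
      rw [pvMain _ PySem.Set.empty PySem.Set.empty
        (by intro l hl; simp [PySem.Set.empty] at hl)]
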